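-- pv_equiv track=rewrite | github.com/FELIPEACASTRO/finops-aws-bdr | src/finops_aws/lambda_mapper.py | _get_service_category
-- ===== SOURCE A (Python) =====
-- def _get_service_category(service_name: str) -> str:
--     """Retorna categoria de um servico"""
--     categories = {
--         'compute': ['ec2', 'lambda', 'ecs', 'eks', 'fargate', 'batch', 'lightsail'],
--         'storage': ['s3', 'ebs', 'efs', 'fsx', 'glacier', 'backup'],
--         'database': ['rds', 'dynamodb', 'elasticache', 'redshift', 'neptune', 'documentdb'],
--         'networking': ['vpc', 'cloudfront', 'route53', 'elb', 'api_gateway'],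
--         'security': ['iam', 'kms', 'secrets_manager', 'waf', 'guardduty', 'security_hub'],
--         'analytics': ['athena', 'emr', 'kinesis', 'glue', 'quicksight', 'opensearch'],
--         'ml': ['sagemaker', 'bedrock', 'rekognition', 'comprehend', 'polly', 'transcribe'],
--         'management': ['cloudwatch', 'cloudtrail', 'config', 'systems_manager', 'organizations']
--     }
--     for category, services in categories.items():
--         if service_name.lower() in services:
--             return category
--     return 'other'
-- ===== SOURCE B (Python) =====
-- # One flat service->category dict; O(1) average lookup instead of scanning 8 lists.
-- _SERVICE_CATEGORY = {
--     'ec2': 'compute',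
--     'lambda': 'compute',
--     'ecs': 'compute',
--     'eks': 'compute',
--     'fargate': 'compute',
--     'batch': 'compute',
--     'lightsail': 'compute',
--     's3': 'storage',
--     'ebs': 'storage',
--     'efs': 'storage',
--     'fsx': 'storage',
--     'glacier': 'storage',
--     'backup': 'storage',
--     'rds': 'database',
--     'dynamodb': 'database',
--     'elasticache': 'database',
--     'redshift': 'database',
--     'neptune': 'database',
--     'documentdb': 'database',
--     'vpc': 'networking',
--     'cloudfront': 'networking',
--     'route53': 'networking',
--     'elb': 'networking',
--     'api_gateway': 'networking',
--     'iam': 'security',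
--     'kms': 'security',
--     'secrets_manager': 'security',
--     'waf': 'security',
--     'guardduty': 'security',
--     'security_hub': 'security',
--     'athena': 'analytics',
--     'emr': 'analytics',
--     'kinesis': 'analytics',
--     'glue': 'analytics',
--     'quicksight': 'analytics',
--     'opensearch': 'analytics',
--     'sagemaker': 'ml',
--     'bedrock': 'ml',
--     'rekognition': 'ml',
--     'comprehend': 'ml',
--     'polly': 'ml',
--     'transcribe': 'ml',
--     'cloudwatch': 'management',
--     'cloudtrail': 'management',
--     'config': 'management',
--     'systems_manager': 'management',
--     'organizations': 'management',
-- }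
--
--
-- def _get_service_category(service_name: str) -> str:
--     """Retorna categoria de um servico"""
--     return _SERVICE_CATEGORY.get(service_name.lower(), 'other')
-- ===== Notes on version B (the rewrite author's own statement) =====
-- stated objective: idiomatic
-- what changed: Replaces the loop over a category->services dict (with a list-membership test per category) by a single flat service->category dict built once, so the body is one .get lookup with the same default; valid because no service name appears under two categories.
import Mathlib
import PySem

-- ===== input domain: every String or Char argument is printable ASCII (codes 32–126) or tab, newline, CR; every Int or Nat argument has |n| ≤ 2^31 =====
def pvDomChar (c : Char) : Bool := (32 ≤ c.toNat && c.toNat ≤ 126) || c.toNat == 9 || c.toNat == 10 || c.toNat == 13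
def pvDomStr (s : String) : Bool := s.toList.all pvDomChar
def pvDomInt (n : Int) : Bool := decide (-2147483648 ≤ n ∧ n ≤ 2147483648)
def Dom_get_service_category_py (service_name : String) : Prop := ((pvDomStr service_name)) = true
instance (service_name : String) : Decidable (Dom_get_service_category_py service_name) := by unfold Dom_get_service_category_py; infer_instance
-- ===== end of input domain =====

-- B replaces A's loop over a category->services dict by one flat service->category dict lookup
-- (same default; every service name is unique across categories), for an idiomatic one-line body.

-- ===== PORT A =====
-- A's categories dict (literal keys are distinct); iterated in insertion order as in Python.
def pvCategories : List (String × List String) := [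
  ("compute", ["ec2", "lambda", "ecs", "eks", "fargate", "batch", "lightsail"]),
  ("storage", ["s3", "ebs", "efs", "fsx", "glacier", "backup"]),
  ("database", ["rds", "dynamodb", "elasticache", "redshift", "neptune", "documentdb"]),
  ("networking", ["vpc", "cloudfront", "route53", "elb", "api_gateway"]),
  ("security", ["iam", "kms", "secrets_manager", "waf", "guardduty", "security_hub"]),
  ("analytics", ["athena", "emr", "kinesis", "glue", "quicksight", "opensearch"]),
  ("ml", ["sagemaker", "bedrock", "rekognition", "comprehend", "polly", "transcribe"]),
  ("management", ["cloudwatch", "cloudtrail", "config", "systems_manager", "organizations"])]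

def pvFindCategory (t : String) : List (String × List String) → String
  | [] => "other"
  | (cat, services) :: rest => if services.contains t then cat else pvFindCategory t rest

def get_service_category_py (service_name : String) : String :=
  pvFindCategory (PySem.Str.lower service_name) pvCategories


-- ===== PORT B =====
def pvServiceCategory : PySem.Dict String String := PySem.Dict.ofList [
  ("ec2", "compute"),
  ("lambda", "compute"),
  ("ecs", "compute"),
  ("eks", "compute"),
  ("fargate", "compute"),
  ("batch", "compute"),
  ("lightsail", "compute"),
  ("s3", "storage"),
  ("ebs", "storage"),
  ("efs", "storage"),
  ("fsx", "storage"),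
  ("glacier", "storage"),
  ("backup", "storage"),
  ("rds", "database"),
  ("dynamodb", "database"),
  ("elasticache", "database"),
  ("redshift", "database"),
  ("neptune", "database"),
  ("documentdb", "database"),
  ("vpc", "networking"),
  ("cloudfront", "networking"),
  ("route53", "networking"),
  ("elb", "networking"),
  ("api_gateway", "networking"),
  ("iam", "security"),
  ("kms", "security"),
  ("secrets_manager", "security"),
  ("waf", "security"),
  ("guardduty", "security"),
  ("security_hub", "security"),
  ("athena", "analytics"),
  ("emr", "analytics"),
  ("kinesis", "analytics"),
  ("glue", "analytics"),
  ("quicksight", "analytics"),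
  ("opensearch", "analytics"),
  ("sagemaker", "ml"),
  ("bedrock", "ml"),
  ("rekognition", "ml"),
  ("comprehend", "ml"),
  ("polly", "ml"),
  ("transcribe", "ml"),
  ("cloudwatch", "management"),
  ("cloudtrail", "management"),
  ("config", "management"),
  ("systems_manager", "management"),
  ("organizations", "management")]

def get_service_category_py_alt (service_name : String) : String :=
  pvServiceCategory.getD (PySem.Str.lower service_name) "other"


-- ===== PRECONDITION & SPEC =====
def Spec_get_service_category_py (service_name : String) (out : String) : Prop := out = get_service_category_py_alt service_name
instance (service_name : String) (out : String) : Decidable (Spec_get_service_category_py service_name out) := by unfold Spec_get_service_category_py; infer_instance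

-- ===== CLAIM (what is proved, stated in full; the proofs are below) =====
def Claim_equal_get_service_category_py : Prop := ∀ (service_name : String), Dom_get_service_category_py service_name → Spec_get_service_category_py service_name (get_service_category_py service_name)

-- ===== LEMMAS AND PROOFS =====

set_option maxRecDepth 100000 in
set_option maxHeartbeats 2000000 in
lemma pvMain (t : String) : pvFindCategory t pvCategories = pvServiceCategory.getD t "other" := by
  have hd : pvServiceCategory = PySem.Dict.mk [
      ("ec2", "compute"),
      ("lambda", "compute"),
      ("ecs", "compute"),
      ("eks", "compute"),
      ("fargate", "compute"),
      ("batch", "compute"),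
      ("lightsail", "compute"),
      ("s3", "storage"),
      ("ebs", "storage"),
      ("efs", "storage"),
      ("fsx", "storage"),
      ("glacier", "storage"),
      ("backup", "storage"),
      ("rds", "database"),
      ("dynamodb", "database"),
      ("elasticache", "database"),
      ("redshift", "database"),
      ("neptune", "database"),
      ("documentdb", "database"),
      ("vpc", "networking"),
      ("cloudfront", "networking"),
      ("route53", "networking"),
      ("elb", "networking"),
      ("api_gateway", "networking"),
      ("iam", "security"),
      ("kms", "security"),
      ("secrets_manager", "security"),
      ("waf", "security"),
      ("guardduty", "security"),
      ("security_hub", "security"),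
      ("athena", "analytics"),
      ("emr", "analytics"),
      ("kinesis", "analytics"),
      ("glue", "analytics"),
      ("quicksight", "analytics"),
      ("opensearch", "analytics"),
      ("sagemaker", "ml"),
      ("bedrock", "ml"),
      ("rekognition", "ml"),
      ("comprehend", "ml"),
      ("polly", "ml"),
      ("transcribe", "ml"),
      ("cloudwatch", "management"),
      ("cloudtrail", "management"),
      ("config", "management"),
      ("systems_manager", "management"),
      ("organizations", "management")] := by decide
  rw [hd]
  by_cases h1 : t = "ec2"; · subst h1; decide
  by_cases h2 : t = "lambda"; · subst h2; decide
  by_cases h3 : t = "ecs"; · subst h3; decide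
  by_cases h4 : t = "eks"; · subst h4; decide
  by_cases h5 : t = "fargate"; · subst h5; decide
  by_cases h6 : t = "batch"; · subst h6; decide
  by_cases h7 : t = "lightsail"; · subst h7; decide
  by_cases h8 : t = "s3"; · subst h8; decide
  by_cases h9 : t = "ebs"; · subst h9; decide
  by_cases h10 : t = "efs"; · subst h10; decide
  by_cases h11 : t = "fsx"; · subst h11; decide
  by_cases h12 : t = "glacier"; · subst h12; decide
  by_cases h13 : t = "backup"; · subst h13; decide
  by_cases h14 : t = "rds"; · subst h14; decide
  by_cases h15 : t = "dynamodb"; · subst h15; decide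
  by_cases h16 : t = "elasticache"; · subst h16; decide
  by_cases h17 : t = "redshift"; · subst h17; decide
  by_cases h18 : t = "neptune"; · subst h18; decide
  by_cases h19 : t = "documentdb"; · subst h19; decide
  by_cases h20 : t = "vpc"; · subst h20; decide
  by_cases h21 : t = "cloudfront"; · subst h21; decide
  by_cases h22 : t = "route53"; · subst h22; decide
  by_cases h23 : t = "elb"; · subst h23; decide
  by_cases h24 : t = "api_gateway"; · subst h24; decide
  by_cases h25 : t = "iam"; · subst h25; decide
  by_cases h26 : t = "kms"; · subst h26; decide
  by_cases h27 : t = "secrets_manager"; · subst h27; decide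
  by_cases h28 : t = "waf"; · subst h28; decide
  by_cases h29 : t = "guardduty"; · subst h29; decide
  by_cases h30 : t = "security_hub"; · subst h30; decide
  by_cases h31 : t = "athena"; · subst h31; decide
  by_cases h32 : t = "emr"; · subst h32; decide
  by_cases h33 : t = "kinesis"; · subst h33; decide
  by_cases h34 : t = "glue"; · subst h34; decide
  by_cases h35 : t = "quicksight"; · subst h35; decide
  by_cases h36 : t = "opensearch"; · subst h36; decide
  by_cases h37 : t = "sagemaker"; · subst h37; decide
  by_cases h38 : t = "bedrock"; · subst h38; decide
  by_cases h39 : t = "rekognition"; · subst h39; decide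
  by_cases h40 : t = "comprehend"; · subst h40; decide
  by_cases h41 : t = "polly"; · subst h41; decide
  by_cases h42 : t = "transcribe"; · subst h42; decide
  by_cases h43 : t = "cloudwatch"; · subst h43; decide
  by_cases h44 : t = "cloudtrail"; · subst h44; decide
  by_cases h45 : t = "config"; · subst h45; decide
  by_cases h46 : t = "systems_manager"; · subst h46; decide
  by_cases h47 : t = "organizations"; · subst h47; decide
  simp [pvCategories, pvFindCategory, PySem.Dict.getD, PySem.Dict.get?,
    h1, h2, h3, h4, h5, h6, h7, h8, h9, h10, h11, h12, h13, h14, h15, h16, h17, h18, h19, h20, h21, h22, h23, h24, h25, h26, h27, h28, h29, h30, h31, h32, h33, h34, h35, h36, h37, h38, h39, h40, h41, h42, h43, h44, h45, h46, h47,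
    Ne.symm h1, Ne.symm h2, Ne.symm h3, Ne.symm h4, Ne.symm h5, Ne.symm h6, Ne.symm h7, Ne.symm h8, Ne.symm h9, Ne.symm h10, Ne.symm h11, Ne.symm h12, Ne.symm h13, Ne.symm h14, Ne.symm h15, Ne.symm h16, Ne.symm h17, Ne.symm h18, Ne.symm h19, Ne.symm h20, Ne.symm h21, Ne.symm h22, Ne.symm h23, Ne.symm h24, Ne.symm h25, Ne.symm h26, Ne.symm h27, Ne.symm h28, Ne.symm h29, Ne.symm h30, Ne.symm h31, Ne.symm h32, Ne.symm h33, Ne.symm h34, Ne.symm h35, Ne.symm h36, Ne.symm h37, Ne.symm h38, Ne.symm h39, Ne.symm h40, Ne.symm h41, Ne.symm h42, Ne.symm h43, Ne.symm h44, Ne.symm h45, Ne.symm h46, Ne.symm h47]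

-- ===== VERDICT (by name: the statement is the Claim_ definition above) =====
theorem get_service_category_py_spec : Claim_equal_get_service_category_py := by
  intro s _
  unfold Spec_get_service_category_py get_service_category_py get_service_category_py_alt
  exact pvMain _
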